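-- pv_equiv track=rewrite | github.com/stepondust/AIHandWriting | Apriori.py | allProperSubset
-- ===== SOURCE A (Python) =====
-- def allProperSubset(superset):
--     '''
--     msg: 获得集合的所有非空真子集
--     param {
--         superset:tuple 元组形式的集合
--     }
--     return{
--         proper_subsets:list 列表形式的集合，列表当中的每个元素均为元组形式的给定集合的非空真子集
--     }
--     '''
--     n = len(superset)
--     proper_subsets = []
--     for i in range(1, 2 ** n - 1): # 根据子集个数，循环遍历所有非空真子集
--         proper_subset = []
--         for j in range(n):
--             if (i >> j) % 2: # 判断二进制下标为 j 的位置数是否为 1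
--                 proper_subset.append(superset[j])
--         proper_subsets.append(tuple(proper_subset))
--     return proper_subsets
-- ===== SOURCE B (Python) =====
-- def allProperSubset(superset):
--     # Build the full powerset by doubling (each element appends as a new high bit),
--     # then drop the empty set (first) and the full set (last).
--     result = [[]]
--     for x in superset:
--         result = result + [s + [x] for s in result]
--     return [tuple(s) for s in result[1:-1]]
-- ===== Notes on version B (the rewrite author's own statement) =====
-- stated objective: alternative
-- what changed: Replaces A's bitmask enumeration (loop over i in 1..2^n-2 with an inner per-bit test over all n positions) by iterative powerset doubling (result = result + [s+[x] for s in result] per element), then slicing off the empty and full subsets; same subsets in the same binary-counting order.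
import Mathlib
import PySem

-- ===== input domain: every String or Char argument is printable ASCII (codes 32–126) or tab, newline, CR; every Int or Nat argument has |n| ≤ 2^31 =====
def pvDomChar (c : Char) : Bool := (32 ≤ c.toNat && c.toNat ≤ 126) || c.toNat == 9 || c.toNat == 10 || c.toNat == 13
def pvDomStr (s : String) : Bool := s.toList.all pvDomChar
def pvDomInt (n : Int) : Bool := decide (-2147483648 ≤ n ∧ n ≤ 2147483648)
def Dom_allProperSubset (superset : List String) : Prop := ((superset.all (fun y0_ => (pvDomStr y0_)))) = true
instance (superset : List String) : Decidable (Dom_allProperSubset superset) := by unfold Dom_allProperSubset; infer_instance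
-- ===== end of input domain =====

-- B replaces A's 2^n-bitmask double loop by iterative powerset doubling (then drops the
-- empty and full subsets); same values and order, a different traversal (objective: alternative).

-- fixed Int-by-Nat right shift (Python's i >> k on these nonnegative values; pins one >>> instance)
def pvShiftR (i : Int) (k : Nat) : Int := i >>> k

-- ===== PORT A =====
-- literal port of A: for i in range(1, 2**n - 1): for j in range(n): if (i >> j) % 2: append superset[j]
-- (superset[j] ported with pyGetD: j ranges over range(len(superset)), always in range, so exact)
def allProperSubset (superset : List String) : List (List String) :=
  let n : Int := (superset.length : Int)
  (PySem.List.pyRange 1 ((2 : Int) ^ superset.length - 1) 1).foldl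
    (fun proper_subsets i =>
      proper_subsets ++
        [(PySem.List.pyRange 0 n 1).foldl
          (fun proper_subset j =>
            if PySem.Int.mod (pvShiftR i j.toNat) 2 ≠ 0 then
              proper_subset ++ [PySem.List.pyGetD superset j ""]
            else proper_subset) []]) []

-- ===== PORT B =====
-- literal port of Source B: powerset by doubling, then result[1:-1]
def allProperSubset_alt (superset : List String) : List (List String) :=
  let result := superset.foldl
    (fun result x => result ++ result.map (fun s => s ++ [x])) [[]]
  PySem.List.slice result (some 1) (some (-1))

-- ===== PRECONDITION & SPEC =====
def Spec_allProperSubset (superset : List String) (out : List (List String)) : Prop := out = allProperSubset_alt superset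
instance (superset : List String) (out : List (List String)) : Decidable (Spec_allProperSubset superset out) := by unfold Spec_allProperSubset; infer_instance

-- ===== CLAIM (what is proved, stated in full; the proofs are below) =====
def Claim_equal_allProperSubset : Prop := ∀ (superset : List String), Dom_allProperSubset superset → Spec_allProperSubset superset (allProperSubset superset)

-- ===== LEMMAS AND PROOFS =====

-- the subset of xs selected by the low bits of m (bit j ↔ xs[j])
def pvMask (m : Nat) : List String → List String
  | [] => []
  | x :: xs => (if m % 2 = 1 then [x] else []) ++ pvMask (m / 2) xs

theorem pvShift_succ (m k : Nat) : m >>> (k + 1) = (m / 2) >>> k := by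
  rw [Nat.shiftRight_eq_div_pow, Nat.shiftRight_eq_div_pow, Nat.div_div_eq_div_mul, pow_succ,
    mul_comm]

theorem pvMask_filter (xs : List String) (m : Nat) :
    ((List.range xs.length).filter (fun k => decide ((m >>> k) % 2 = 1))).map (fun k => xs.getD k "")
      = pvMask m xs := by
  induction xs generalizing m with
  | nil => simp [pvMask]
  | cons x l ih =>
    rw [List.length_cons, List.range_succ_eq_map, List.filter_cons, List.filter_map]
    have hsucc : ((fun k => decide ((m >>> k) % 2 = 1)) ∘ Nat.succ)
        = (fun k => decide (((m / 2) >>> k) % 2 = 1)) := by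
      funext k
      simp only [Function.comp_apply, Nat.succ_eq_add_one, pvShift_succ]
    rw [hsucc]
    by_cases h : m % 2 = 1
    · rw [if_pos (by simp [h])]
      rw [List.map_cons, List.map_map]
      have hget : ((fun k => (x :: l).getD k "") ∘ Nat.succ) = (fun k => l.getD k "") := by
        funext k; rfl
      rw [hget, ih]
      simp [pvMask, h]
    · rw [if_neg (by simp [h])]
      rw [List.map_map]
      have hget : ((fun k => (x :: l).getD k "") ∘ Nat.succ) = (fun k => l.getD k "") := by
        funext k; rfl
      rw [hget, ih]
      simp [pvMask, h]

-- pvMask only reads the low xs.length bits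
theorem pvMask_mod (xs : List String) (m : Nat) :
    pvMask (m % 2 ^ xs.length) xs = pvMask m xs := by
  induction xs generalizing m with
  | nil => rfl
  | cons x l ih =>
    have h1 : m % 2 ^ (l.length + 1) % 2 = m % 2 :=
      Nat.mod_mod_of_dvd m (dvd_pow_self 2 (Nat.succ_ne_zero _))
    have h2 : m % 2 ^ (l.length + 1) / 2 = m / 2 % 2 ^ l.length := by
      rw [pow_succ, mul_comm, Nat.mod_mul_right_div_self]
    simp only [pvMask, List.length_cons, h1, h2, ih]

-- appending an element adds it as the next-higher bit
theorem pvMask_append (xs : List String) (x : String) (m : Nat) :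
    pvMask m (xs ++ [x]) = pvMask m xs ++ (if (m >>> xs.length) % 2 = 1 then [x] else []) := by
  induction xs generalizing m with
  | nil => simp [pvMask]
  | cons y l ih =>
    simp only [List.cons_append, pvMask, ih, List.length_cons, pvShift_succ, List.append_assoc]

-- the doubling fold builds the powerset in binary-counting order
theorem pvDoubling_eq (xs : List String) :
    xs.foldl (fun result x => result ++ result.map (fun s => s ++ [x])) [[]]
      = (List.range (2 ^ xs.length)).map (fun m => pvMask m xs) := by
  induction xs using List.reverseRecOn with
  | nil => simp [pvMask]
  | append_singleton l x ih =>
    rw [List.foldl_append, List.foldl_cons, List.foldl_nil, ih]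
    have hlen : 2 ^ (l ++ [x]).length = 2 ^ l.length + 2 ^ l.length := by
      simp [pow_succ]; ring
    rw [hlen, List.range_add, List.map_append, List.map_map]
    congr 1
    · apply List.map_congr_left
      intro m hm
      rw [List.mem_range] at hm
      rw [pvMask_append]
      have : m >>> l.length = 0 := by
        simp [Nat.shiftRight_eq_div_pow, Nat.div_eq_of_lt hm]
      simp [this]
    · rw [List.map_map]
      apply List.map_congr_left
      intro k hk
      rw [List.mem_range] at hk
      simp only [Function.comp_def]
      rw [pvMask_append]
      have hbit : (2 ^ l.length + k) >>> l.length = 1 := by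
        rw [Nat.shiftRight_eq_div_pow, Nat.add_div_left _ (Nat.two_pow_pos _),
          Nat.div_eq_of_lt hk]
      have hlow : pvMask (2 ^ l.length + k) l = pvMask k l := by
        have h := pvMask_mod l (2 ^ l.length + k)
        rw [Nat.add_mod_left, Nat.mod_eq_of_lt hk] at h
        exact h.symm
      simp [hbit, hlow]

-- A's inner loop computes pvMask
theorem pvInner_eq (xs : List String) (m : Nat) :
    (PySem.List.pyRange 0 (xs.length : Int) 1).foldl
      (fun proper_subset j =>
        if PySem.Int.mod (pvShiftR ((m : Nat) : Int) j.toNat) 2 ≠ 0 then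
          proper_subset ++ [PySem.List.pyGetD xs j ""]
        else proper_subset) []
      = pvMask m xs := by
  rw [PySem.List.foldl_append_ite, List.nil_append, PySem.List.pyRange_one]
  have h1 : ((xs.length : Int) - 0).toNat = xs.length := by omega
  rw [h1, List.filter_map, List.map_map]
  have hsh : ∀ k : Nat, pvShiftR ((m : Nat) : Int) k = (((m >>> k : Nat) : Nat) : Int) := by
    intro k; simp [pvShiftR]
  have hmod : ∀ a : Nat, PySem.Int.mod ((a : Nat) : Int) 2 = (((a % 2 : Nat) : Nat) : Int) := by
    intro a; simp [PySem.Int.mod, Int.fmod_eq_emod]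
  have hcond : ((fun j => decide (PySem.Int.mod (pvShiftR ((m : Nat) : Int) j.toNat) 2 ≠ 0)) ∘ (fun k : Nat => (0 : Int) + (k : Nat)))
      = (fun k : Nat => decide ((m >>> k) % 2 = 1)) := by
    funext k
    simp only [Function.comp_apply, zero_add, Int.toNat_natCast, hsh, hmod]
    rcases Nat.mod_two_eq_zero_or_one (m >>> k) with h | h <;> simp [h]
  have hget : ((fun j => PySem.List.pyGetD xs j "") ∘ (fun k : Nat => (0 : Int) + (k : Nat)))
      = (fun k : Nat => xs.getD k "") := by
    funext k
    simp only [Function.comp_apply, zero_add, PySem.List.pyGetD_natCast]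
  rw [hcond, hget, pvMask_filter]

theorem pvSlice_one_negone (xs : List (List String)) :
    PySem.List.slice xs (some 1) (some (-1)) = (xs.drop 1).dropLast := by
  cases xs with
  | nil => rfl
  | cons a l =>
    simp [PySem.List.slice, PySem.List.clampIdx, List.dropLast_eq_take]
    split <;> omega

-- ===== VERDICT (by name: the statement is the Claim_ definition above) =====
theorem allProperSubset_spec : Claim_equal_allProperSubset := by
  intro xs _
  unfold Spec_allProperSubset allProperSubset allProperSubset_alt
  rw [pvSlice_one_negone, pvDoubling_eq]
  rw [PySem.List.foldl_append_singleton_eq_map, List.nil_append]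
  have hmem : ∀ i ∈ PySem.List.pyRange 1 ((2 : Int) ^ xs.length - 1) 1,
      (PySem.List.pyRange 0 ((xs.length : Int)) 1).foldl
        (fun proper_subset j =>
          if PySem.Int.mod (pvShiftR i j.toNat) 2 ≠ 0 then
            proper_subset ++ [PySem.List.pyGetD xs j ""]
          else proper_subset) []
      = pvMask i.toNat xs := by
    intro i hi
    rw [PySem.List.mem_pyRange_one] at hi
    have h0 : ((i.toNat : Nat) : Int) = i := Int.toNat_of_nonneg (by omega)
    rw [← h0]
    exact pvInner_eq xs i.toNat
  refine (List.map_congr_left hmem).trans ?_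
  rw [PySem.List.pyRange_one, List.map_map]
  have hcast : ((2 : Int) ^ xs.length) = ((2 ^ xs.length : Nat) : Int) := by push_cast; ring
  have hpos : 1 ≤ 2 ^ xs.length := Nat.one_le_two_pow
  apply List.ext_getElem
  · simp only [List.length_map, List.length_range, List.length_dropLast, List.length_drop]
    rw [hcast]
    omega
  · intro k h1 h2
    simp only [List.getElem_map, List.getElem_range, Function.comp_def]
    rw [List.getElem_dropLast, List.getElem_drop, List.getElem_map, List.getElem_range]
    have : ((1 : Int) + (k : Nat)).toNat = 1 + k := by omega
    rw [this]
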